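-- pv_equiv track=rewrite | github.com/munzel94/Rh_PlugIn_Basic_Top3ConsWithMultiplyer | __init__.py | filter_shortest_consecutives
-- ===== SOURCE A (Python) =====
-- def filter_shortest_consecutives(data):
--     pilot_best_runs = {}
--
--     for line in data:
--         pilot_id = line['pilot_id']
--
--         # Skip pilots with laps <= 3
--         if line['laps'] <= 3:
--             continue
--
--         # Parse consecutives_raw to compare numeric values
--         consecutives_time = line['consecutives_raw']
--
--         # Update pilot_best_runs if:
--         # - Pilot is not already in the dict
--         # - Current run has a shorter consecutives time
--         if pilot_id not in pilot_best_runs or consecutives_time < pilot_best_runs[pilot_id]['consecutives_raw']: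
--             pilot_best_runs[pilot_id] = line
--
--     return list(pilot_best_runs.values())
-- ===== SOURCE B (Python) =====
-- def filter_shortest_consecutives(data):
--     groups = {}
--     for line in data:
--         if line['laps'] > 3:
--             groups.setdefault(line['pilot_id'], []).append(line)
--     return [min(g, key=lambda l: l['consecutives_raw']) for g in groups.values()]
-- ===== Notes on version B (the rewrite author's own statement) =====
-- stated objective: alternative
-- what changed: B collects each pilot's qualifying (laps>3) lines into a group in one pass, then reduces each group with min keyed on consecutives_raw, instead of A's online best-so-far dict update.
import Mathlib
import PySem

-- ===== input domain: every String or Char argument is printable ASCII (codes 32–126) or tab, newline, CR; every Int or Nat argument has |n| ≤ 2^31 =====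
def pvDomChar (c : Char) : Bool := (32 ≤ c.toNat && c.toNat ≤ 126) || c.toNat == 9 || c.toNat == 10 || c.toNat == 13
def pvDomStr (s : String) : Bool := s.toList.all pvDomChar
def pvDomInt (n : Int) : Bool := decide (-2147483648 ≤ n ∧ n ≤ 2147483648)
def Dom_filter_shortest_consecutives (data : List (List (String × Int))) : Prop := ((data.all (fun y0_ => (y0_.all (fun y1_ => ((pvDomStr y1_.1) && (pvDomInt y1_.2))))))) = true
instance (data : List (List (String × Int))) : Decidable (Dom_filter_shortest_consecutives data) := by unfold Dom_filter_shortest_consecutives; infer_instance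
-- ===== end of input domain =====

-- B differs from A only in decomposition (group-then-min instead of online best-so-far);
-- equivalence is claimed on inputs where the Python A returns (Pre_ excludes the KeyError cases).

-- ===== PORT A =====
-- line[k]: first-match lookup in the line's key/value pairs (none = Python KeyError)
def pvGet (line : List (String × Int)) (k : String) : Option Int :=
  PySem.Dict.get? (PySem.Dict.mk line) k

-- one iteration of A's loop: skip laps<=3, else keep the strictly shorter consecutives_raw
def stepA (best : PySem.Dict Int (List (String × Int))) (line : List (String × Int)) :
    PySem.Dict Int (List (String × Int)) :=
  match pvGet line "pilot_id", pvGet line "laps" with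
  | some pid, some laps =>
    if laps ≤ 3 then best
    else
      match pvGet line "consecutives_raw" with
      | some ct =>
        match PySem.Dict.get? best pid with
        | none => best.insert pid line
        | some prev =>
          match pvGet prev "consecutives_raw" with
          | some pct => if ct < pct then best.insert pid line else best
          | none => best      -- unreachable: stored lines were inserted with the key present
      | none => best          -- KeyError in Python: outside Pre_
  | _, _ => best              -- KeyError in Python: outside Pre_

def filter_shortest_consecutives (data : List (List (String × Int))) : List (List (String × Int)) :=
  PySem.Dict.values (data.foldl stepA PySem.Dict.empty)

-- ===== PORT B =====
-- min's key: l['consecutives_raw'] (default 0 stands in for the KeyError case, which Pre_ excludes)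
def keyB (l : List (String × Int)) : Int := (pvGet l "consecutives_raw").getD 0

-- one iteration of B's grouping loop: append qualifying lines to the pilot's group
def stepB (g : PySem.Dict Int (List (List (String × Int)))) (line : List (String × Int)) :
    PySem.Dict Int (List (List (String × Int))) :=
  match pvGet line "laps", pvGet line "pilot_id" with
  | some laps, some pid =>
      if 3 < laps then g.insert pid (g.getD pid [] ++ [line]) else g
  | _, _ => g

def filter_shortest_consecutives_alt (data : List (List (String × Int))) : List (List (String × Int)) :=
  ((data.foldl stepB PySem.Dict.empty).values).filterMap
    (fun grp => PySem.List.min? grp keyB)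

-- ===== PRECONDITION & SPEC =====
-- Pre_ excludes exactly the inputs on which the Python A raises KeyError: a line missing
-- 'pilot_id' or 'laps', or a qualifying (laps > 3) line missing 'consecutives_raw'.
def Pre_filter_shortest_consecutives (data : List (List (String × Int))) : Prop :=
  ∀ line ∈ data, (pvGet line "pilot_id").isSome ∧ (pvGet line "laps").isSome ∧
    (∀ laps : Int, pvGet line "laps" = some laps → 3 < laps → (pvGet line "consecutives_raw").isSome)
instance (data : List (List (String × Int))) : Decidable (Pre_filter_shortest_consecutives data) := by
  unfold Pre_filter_shortest_consecutives; infer_instance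

def pvWitness_filter_shortest_consecutives : (List (List (String × Int))) :=
  [[("pilot_id", 1), ("laps", 4), ("consecutives_raw", 10)],
   [("pilot_id", 1), ("laps", 5), ("consecutives_raw", 7)],
   [("pilot_id", 2), ("laps", 2)]]

def Spec_filter_shortest_consecutives (data : List (List (String × Int))) (out : List (List (String × Int))) : Prop := out = filter_shortest_consecutives_alt data
instance (data : List (List (String × Int))) (out : List (List (String × Int))) : Decidable (Spec_filter_shortest_consecutives data out) := by unfold Spec_filter_shortest_consecutives; infer_instance

-- ===== CLAIM (what is proved, stated in full; the proofs are below) =====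
def Claim_equal_filter_shortest_consecutives : Prop := ∀ (data : List (List (String × Int))), Dom_filter_shortest_consecutives data → Pre_filter_shortest_consecutives data → Spec_filter_shortest_consecutives data (filter_shortest_consecutives data)

-- ===== LEMMAS AND PROOFS =====

-- the loop invariant relating A's best-so-far dict to B's groups dict
def LoopInv (best : PySem.Dict Int (List (String × Int)))
    (g : PySem.Dict Int (List (List (String × Int)))) : Prop :=
  best.keys = g.keys ∧ g.keys.Nodup ∧
  ∀ pid grp, g.get? pid = some grp →
    (∀ l ∈ grp, (pvGet l "consecutives_raw").isSome) ∧
    ∃ v, PySem.List.min? grp keyB = some v ∧ best.get? pid = some v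

theorem min?_append_singleton {α : Type} (xs : List α) (x : α) (key : α → Int) :
    PySem.List.min? (xs ++ [x]) key =
      match PySem.List.min? xs key with
      | none => some x
      | some m => if key x < key m then some x else some m := by
  simp only [PySem.List.min?, List.foldl_append, List.foldl_cons, List.foldl_nil]
  rfl

theorem inv_step (best : PySem.Dict Int (List (String × Int)))
    (g : PySem.Dict Int (List (List (String × Int)))) (line : List (String × Int))
    (hinv : LoopInv best g)
    (hline : (pvGet line "pilot_id").isSome ∧ (pvGet line "laps").isSome ∧
      (∀ laps : Int, pvGet line "laps" = some laps → 3 < laps → (pvGet line "consecutives_raw").isSome)) :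
    LoopInv (stepA best line) (stepB g line) := by
  obtain ⟨hk, hnd, hval⟩ := hinv
  obtain ⟨hp, hl, hc⟩ := hline
  obtain ⟨pid, hpid⟩ := Option.isSome_iff_exists.mp hp
  obtain ⟨laps, hlaps⟩ := Option.isSome_iff_exists.mp hl
  by_cases hle : laps ≤ 3
  · -- skipped line: both states unchanged
    have : ¬ (3 < laps) := by omega
    simp only [stepA, stepB, hpid, hlaps, if_pos hle, if_neg this]
    exact ⟨hk, hnd, hval⟩
  · have hgt : 3 < laps := by omega
    obtain ⟨ct, hct⟩ := Option.isSome_iff_exists.mp (hc laps hlaps hgt)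
    simp only [stepA, stepB, hpid, hlaps, if_neg hle, if_pos hgt, hct]
    cases hgp : g.get? pid with
    | none =>
      -- new pilot: fresh key appended to both dicts, singleton group
      have hbp : best.get? pid = none := by
        rw [PySem.Dict.get?_eq_none_iff_not_mem_keys] at hgp ⊢
        rw [hk]; exact hgp
      have hgc : g.contains pid = false := by
        rw [PySem.Dict.contains_eq_isSome_get?, hgp]; rfl
      have hbc : best.contains pid = false := by
        rw [PySem.Dict.contains_eq_isSome_get?, hbp]; rfl
      have hgd : g.getD pid [] = [] := PySem.Dict.getD_of_get?_eq_none _ [] hgp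
      rw [hbp, hgd]
      refine ⟨?_, ?_, ?_⟩
      · rw [PySem.Dict.keys_insert_of_not_contains _ _ hbc,
            PySem.Dict.keys_insert_of_not_contains _ _ hgc, hk]
      · exact PySem.Dict.nodup_keys_insert _ _ _ hnd
      · intro pid' grp' hget'
        rw [PySem.Dict.get?_insert] at hget'
        by_cases hpe : pid' = pid
        · subst hpe
          rw [if_pos rfl] at hget'
          cases hget'
          refine ⟨?_, line, ?_, ?_⟩
          · intro l hl'; simp at hl'; subst hl'; simp [hct]
          · simp [PySem.List.min?]
          · rw [PySem.Dict.get?_insert]; simp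
        · rw [if_neg hpe] at hget'
          obtain ⟨h1, v, h2, h3⟩ := hval pid' grp' hget'
          refine ⟨h1, v, h2, ?_⟩
          rw [PySem.Dict.get?_insert, if_neg hpe]; exact h3
    | some grp =>
      -- existing pilot: A compares against its stored best, B appends to the group
      obtain ⟨hmem, v, hmin, hbest⟩ := hval pid grp hgp
      have hvc : (pvGet v "consecutives_raw").isSome :=
        hmem v (PySem.List.min?_mem hmin)
      obtain ⟨pct, hpct⟩ := Option.isSome_iff_exists.mp hvc
      have hgc : g.contains pid = true := by
        rw [PySem.Dict.contains_eq_isSome_get?, hgp]; rfl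
      have hbc : best.contains pid = true := by
        rw [PySem.Dict.contains_eq_isSome_get?, hbest]; rfl
      have hgd : g.getD pid [] = grp := PySem.Dict.getD_of_get?_eq_some _ [] hgp
      simp only [hbest, hgd, hpct]
      have hkeyv : keyB v = pct := by simp [keyB, hpct]
      have hkeyl : keyB line = ct := by simp [keyB, hct]
      have hkeys' : (if ct < pct then best.insert pid line else best).keys =
          (g.insert pid (grp ++ [line])).keys := by
        rw [PySem.Dict.keys_insert_of_contains _ _ hgc]
        split
        · rw [PySem.Dict.keys_insert_of_contains _ _ hbc, hk]
        · exact hk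
      refine ⟨hkeys', by rw [PySem.Dict.keys_insert_of_contains _ _ hgc]; exact hnd, ?_⟩
      intro pid' grp' hget'
      rw [PySem.Dict.get?_insert] at hget'
      by_cases hpe : pid' = pid
      · subst hpe
        rw [if_pos rfl] at hget'
        cases hget'
        refine ⟨?_, ?_⟩
        · intro l hl'
          rcases List.mem_append.mp hl' with h | h
          · exact hmem l h
          · simp at h; subst h; simp [hct]
        · simp only [min?_append_singleton, hmin, hkeyl, hkeyv]
          by_cases hlt : ct < pct
          · exact ⟨line, by rw [if_pos hlt], by rw [if_pos hlt, PySem.Dict.get?_insert]; simp⟩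
          · exact ⟨v, by rw [if_neg hlt], by rw [if_neg hlt]; exact hbest⟩
      · rw [if_neg hpe] at hget'
        obtain ⟨h1, w, h2, h3⟩ := hval pid' grp' hget'
        refine ⟨h1, w, h2, ?_⟩
        split
        · rw [PySem.Dict.get?_insert, if_neg hpe]; exact h3
        · exact h3

theorem inv_foldl (data : List (List (String × Int)))
    (best : PySem.Dict Int (List (String × Int)))
    (g : PySem.Dict Int (List (List (String × Int))))
    (hinv : LoopInv best g)
    (hpre : ∀ line ∈ data, (pvGet line "pilot_id").isSome ∧ (pvGet line "laps").isSome ∧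
      (∀ laps : Int, pvGet line "laps" = some laps → 3 < laps → (pvGet line "consecutives_raw").isSome)) :
    LoopInv (data.foldl stepA best) (data.foldl stepB g) := by
  induction data generalizing best g with
  | nil => exact hinv
  | cons line rest ih =>
    simp only [List.foldl_cons]
    exact ih _ _ (inv_step best g line hinv (hpre line (by simp)))
      (fun l hl => hpre l (by simp [hl]))

theorem map_eq_filterMap_of_some {α β : Type} (f : α → Option β) (h : α → β) (l : List α)
    (H : ∀ a ∈ l, f a = some (h a)) : l.map h = l.filterMap f := by
  induction l with
  | nil => simp
  | cons a t ih =>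
    simp [H a (by simp), ih (fun x hx => H x (by simp [hx]))]

theorem values_of_inv (best : PySem.Dict Int (List (String × Int)))
    (g : PySem.Dict Int (List (List (String × Int))))
    (hinv : LoopInv best g) :
    best.values = g.values.filterMap (fun grp => PySem.List.min? grp keyB) := by
  obtain ⟨hk, hnd, hval⟩ := hinv
  have hbnd : best.keys.Nodup := by rw [hk]; exact hnd
  rw [PySem.Dict.values_eq_map_keys best hbnd [],
      PySem.Dict.values_eq_map_keys g hnd [],
      List.filterMap_map, hk]
  apply map_eq_filterMap_of_some
  intro k hkmem
  obtain ⟨grp, hget⟩ : ∃ grp, g.get? k = some grp := by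
    cases h : g.get? k with
    | none =>
      rw [PySem.Dict.get?_eq_none_iff_not_mem_keys] at h
      exact absurd hkmem h
    | some grp => exact ⟨grp, rfl⟩
  obtain ⟨_, v, hmin, hbest⟩ := hval k grp hget
  simp only [Function.comp_apply]
  rw [PySem.Dict.getD_of_get?_eq_some _ [] hget, PySem.Dict.getD_of_get?_eq_some _ [] hbest]
  exact hmin

-- ===== VERDICT (by name: the statement is the Claim_ definition above) =====
theorem filter_shortest_consecutives_spec : Claim_equal_filter_shortest_consecutives := by
  intro data _ hpre
  unfold Spec_filter_shortest_consecutives filter_shortest_consecutives filter_shortest_consecutives_alt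
  exact values_of_inv _ _ (inv_foldl data PySem.Dict.empty PySem.Dict.empty
    ⟨by simp [PySem.Dict.keys_empty], by simp [PySem.Dict.keys_empty],
     fun pid grp h => by simp [PySem.Dict.get?_empty] at h⟩ hpre)
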